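-- pv_equiv track=rewrite | github.com/JafarbekH/sol80ta | string45_56.py | EngQisqa
-- ===== SOURCE A (Python) =====
-- def EngQisqa(satr):
--
--     l = satr.split(' ')
--     l_num = []
--     for i in l:
--         l_num.append(len(i))
--     min_num = min(l_num)
--
--     for i in l:
--         if len(i) == min_num:
--
--             return f'{i} {min_num}'
-- ===== SOURCE B (Python) =====
-- def EngQisqa(satr):
--     words = satr.split(' ')
--     best = words[0]
--     for w in words[1:]:
--         if len(w) < len(best):
--             best = w
--     return f'{best} {len(best)}'
-- ===== Notes on version B (the rewrite author's own statement) =====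
-- stated objective: simpler
-- what changed: B replaces A's three phases (build a list of lengths, take min over it, rescan the words for the first length match) by a single pass that keeps the running shortest word (strict '<' keeps the first shortest), formatting the result from that word alone.
import Mathlib
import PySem

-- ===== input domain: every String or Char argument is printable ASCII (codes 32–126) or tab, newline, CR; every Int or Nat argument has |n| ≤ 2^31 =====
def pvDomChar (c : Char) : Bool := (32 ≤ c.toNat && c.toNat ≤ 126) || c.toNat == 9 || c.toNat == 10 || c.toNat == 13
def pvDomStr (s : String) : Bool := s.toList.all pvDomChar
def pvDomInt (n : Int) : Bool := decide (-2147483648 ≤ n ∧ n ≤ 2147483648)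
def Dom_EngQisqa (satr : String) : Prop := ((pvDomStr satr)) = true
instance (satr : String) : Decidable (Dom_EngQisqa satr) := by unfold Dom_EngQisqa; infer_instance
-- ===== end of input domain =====

-- B: single pass keeping the running shortest word instead of A's length-list + min + rescan (simpler decomposition, same O(n) cost).


-- ===== PORT A =====
-- A's second loop: return the first word whose length equals min_num, formatted 'f"{i} {min_num}"'.
def pvLoopA : List String → Int → Option String
  | [], _ => none
  | i :: rest, m =>
      if PySem.Str.len i = m then some (i ++ " " ++ PySem.Int.toStr m) else pvLoopA rest m

def EngQisqa (satr : String) : String :=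
  match PySem.Str.split? satr " " with
  | none => ""            -- dead: the separator " " is nonempty, split never raises
  | some l =>
    let l_num := l.foldl (fun acc i => acc ++ [PySem.Str.len i]) []
    match PySem.List.min? l_num (fun x => x) with
    | none => ""          -- dead: split(' ') never returns an empty list, so min never raises
    | some min_num =>
      match pvLoopA l min_num with
      | some r => r
      | none => ""        -- dead: some word has the minimal length

-- ===== PORT B =====
def EngQisqa_alt (satr : String) : String :=
  match PySem.Str.split? satr " " with
  | none => ""            -- dead: the separator " " is nonempty
  | some [] => ""         -- dead: split(' ') never returns an empty list (words[0] never raises)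
  | some (b :: rest) =>
    let best := rest.foldl (fun bb w => if PySem.Str.len w < PySem.Str.len bb then w else bb) b
    best ++ " " ++ PySem.Int.toStr (PySem.Str.len best)

-- ===== PRECONDITION & SPEC =====
def Spec_EngQisqa (satr : String) (out : String) : Prop := out = EngQisqa_alt satr
instance (satr : String) (out : String) : Decidable (Spec_EngQisqa satr out) := by unfold Spec_EngQisqa; infer_instance

-- ===== CLAIM (what is proved, stated in full; the proofs are below) =====
def Claim_equal_EngQisqa : Prop := ∀ (satr : String), Dom_EngQisqa satr → Spec_EngQisqa satr (EngQisqa satr)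

-- ===== LEMMAS AND PROOFS =====

-- splitOn.go always returns a nonempty list (it reverses a cons).
lemma pvGo_ne_nil (sep : List Char) :
    ∀ (fuel : Nat) (l cur : List Char) (acc : List (List Char)),
      PySem.Chars.splitOn.go sep fuel l cur acc ≠ [] := by
  intro fuel
  induction fuel with
  | zero => intro l cur acc; simp [PySem.Chars.splitOn.go]
  | succ n ih =>
    intro l cur acc
    cases l with
    | nil => simp [PySem.Chars.splitOn.go]
    | cons c rest =>
      rw [PySem.Chars.splitOn.go]
      split
      · exact ih _ _ _
      · exact ih _ _ _

lemma pvSplit_some_ne_nil (satr : String) :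
    ∃ l, PySem.Str.split? satr " " = some l ∧ l ≠ [] := by
  simp only [PySem.Str.split?, PySem.Chars.split?, PySem.Chars.splitOn]
  simp [pvGo_ne_nil]

-- the running fold min is a lower bound of its init and of every element
lemma pvFoldlMin_le (l : List Int) : ∀ (a : Int),
    l.foldl min a ≤ a ∧ ∀ x ∈ l, l.foldl min a ≤ x := by
  induction l with
  | nil => intro a; simp
  | cons y t ih =>
    intro a
    obtain ⟨h1, h2⟩ := ih (min a y)
    refine ⟨le_trans h1 (min_le_left _ _), ?_⟩
    intro x hx
    rcases List.mem_cons.mp hx with rfl | hx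
    · exact le_trans h1 (min_le_right _ _)
    · exact h2 x hx

-- key invariant: B's running-best fold has length equal to the running min of
-- the lengths, and A's rescan (pvLoopA) finds exactly that word.
lemma pvKey : ∀ (t : List String) (b : String),
    PySem.Str.len (t.foldl (fun bb w => if PySem.Str.len w < PySem.Str.len bb then w else bb) b)
      = (t.map PySem.Str.len).foldl min (PySem.Str.len b)
  ∧ pvLoopA (b :: t) ((t.map PySem.Str.len).foldl min (PySem.Str.len b))
      = some ((t.foldl (fun bb w => if PySem.Str.len w < PySem.Str.len bb then w else bb) b)
              ++ " " ++ PySem.Int.toStr ((t.map PySem.Str.len).foldl min (PySem.Str.len b))) := by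
  intro t
  induction t with
  | nil => intro b; simp [pvLoopA]
  | cons w tt ih =>
    intro b
    have hb' : PySem.Str.len (if PySem.Str.len w < PySem.Str.len b then w else b)
        = min (PySem.Str.len b) (PySem.Str.len w) := by
      by_cases h : PySem.Str.len w < PySem.Str.len b
      · rw [if_pos h, min_eq_right (le_of_lt h)]
      · rw [if_neg h, min_eq_left (le_of_not_gt h)]
    obtain ⟨ih1, ih2⟩ := ih (if PySem.Str.len w < PySem.Str.len b then w else b)
    rw [hb'] at ih1 ih2
    have hM := pvFoldlMin_le (tt.map PySem.Str.len) (min (PySem.Str.len b) (PySem.Str.len w))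
    set M := (tt.map PySem.Str.len).foldl min (min (PySem.Str.len b) (PySem.Str.len w)) with hMdef
    have hMb : M ≤ PySem.Str.len b := le_trans hM.1 (min_le_left _ _)
    have hMw : M ≤ PySem.Str.len w := le_trans hM.1 (min_le_right _ _)
    have hfold : ((w :: tt).map PySem.Str.len).foldl min (PySem.Str.len b) = M := by
      simp [hMdef, List.foldl_cons]
    refine ⟨?_, ?_⟩
    · simpa [List.foldl_cons, hfold] using ih1
    · rw [hfold]
      by_cases h1 : PySem.Str.len b = M
      · -- the head already has minimal length; B's fold keeps it
        have hbw : ¬ PySem.Str.len w < PySem.Str.len b := by omega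
        rw [if_neg hbw] at ih2
        simp only [pvLoopA, if_pos h1] at ih2 ⊢
        rw [List.foldl_cons, if_neg hbw]
        exact ih2
      · have h1' : M < PySem.Str.len b := lt_of_le_of_ne hMb (Ne.symm h1)
        by_cases hw : PySem.Str.len w < PySem.Str.len b
        · rw [if_pos hw] at ih2
          simp only [pvLoopA, if_neg h1]
          rw [List.foldl_cons, if_pos hw]
          exact ih2
        · rw [if_neg hw] at ih2
          have hwM : ¬ PySem.Str.len w = M := by omega
          simp only [pvLoopA, if_neg h1] at ih2
          simp only [pvLoopA, if_neg h1, if_neg hwM]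
          rw [List.foldl_cons, if_neg hw]
          exact ih2

-- ===== VERDICT (by name: the statement is the Claim_ definition above) =====
theorem EngQisqa_spec : Claim_equal_EngQisqa := by
  intro satr _
  unfold Spec_EngQisqa EngQisqa EngQisqa_alt
  obtain ⟨l, hl, hne⟩ := pvSplit_some_ne_nil satr
  rw [hl]
  cases l with
  | nil => exact absurd rfl hne
  | cons b rest =>
    obtain ⟨h1, h2⟩ := pvKey rest b
    simp only [PySem.List.foldl_append_singleton_eq_map, List.nil_append, List.map_cons,
      PySem.List.min?_id_cons]
    rw [h2, h1]
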